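-- pv_equiv track=rewrite | github.com/Patnor/Math220Projects | HillCipher.py | createMessageMatrix
-- ===== SOURCE A (Python) =====
-- def findKey(value, alphabeDict):
--     for key, val in alphabeDict.items():
--         if val == value:
--             return key
--
-- def createMessageMatrix(message, alphabeDict):
--     numCols = (len(message) + 1) // 2
--
--     #set up the message matrix
--     messageMatrix = [[None] * numCols, [None] * numCols]
--
--     # first row of message matrix
--     for i in range(0, numCols):
--         messageMatrix[0][i] = findKey(message[i], alphabeDict)
--
--     # second row of message matrix
--     for i in range(0, numCols):
--         # check if the message is odd and if so add a space at the end
--         if(numCols + i >= len(message)):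
--             messageMatrix[1][i] = 28
--         else:
--             messageMatrix[1][i] = findKey(message[numCols + i ], alphabeDict)
--
--     return messageMatrix
-- ===== SOURCE B (Python) =====
-- def createMessageMatrix(message, alphabeDict):
--     # split the message into its two halves and consume them as queues in lockstep,
--     # building both rows column by column; pad the bottom row once the back queue runs dry
--     n = (len(message) + 1) // 2
--     front = list(message[:n])
--     back = list(message[n:])
--     row0, row1 = [], []
--     while front:
--         row0.append(lookup(front.pop(0), alphabeDict))
--         row1.append(lookup(back.pop(0), alphabeDict) if back else 28)
--     return [row0, row1]
--
-- def lookup(ch, alphabeDict):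
--     return next((k for k, v in alphabeDict.items() if v == ch), None)
-- ===== Notes on version B (the rewrite author's own statement) =====
-- stated objective: alternative
-- what changed: Instead of two staged column-indexed fill loops with a per-cell 'numCols+i >= len(message)' padding test, B splits the message into its two halves, consumes them as queues in lockstep in a single loop that builds both rows column by column, and pads the bottom row with 28 exactly when the back queue is exhausted; there is no index arithmetic at all.
import Mathlib
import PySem

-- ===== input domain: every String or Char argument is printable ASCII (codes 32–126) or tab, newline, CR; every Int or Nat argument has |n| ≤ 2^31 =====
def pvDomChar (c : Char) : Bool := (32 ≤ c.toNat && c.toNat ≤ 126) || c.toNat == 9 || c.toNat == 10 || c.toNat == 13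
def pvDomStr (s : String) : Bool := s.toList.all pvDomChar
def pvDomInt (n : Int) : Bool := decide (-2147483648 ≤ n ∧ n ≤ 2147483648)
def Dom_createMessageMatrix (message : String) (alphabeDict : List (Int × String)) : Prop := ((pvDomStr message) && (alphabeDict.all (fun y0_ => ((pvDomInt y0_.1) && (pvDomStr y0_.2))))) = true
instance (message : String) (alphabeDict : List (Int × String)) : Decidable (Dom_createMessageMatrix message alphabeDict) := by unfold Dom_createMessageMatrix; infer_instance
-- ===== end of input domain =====

-- B replaces A's two column-indexed fill loops and per-cell padding test with one lockstep
-- consumption of the two message halves as queues, building both rows column by column (alternative).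

-- ===== PORT A =====
-- findKey iterates the dict's items, returning the key of the first matching value (None if absent)
def findKeyAux (value : String) : List (Int × String) → Option Int
  | [] => none
  | (k, v) :: rest => if v == value then some k else findKeyAux value rest

def findKey (value : String) (alphabeDict : List (Int × String)) : Option Int :=
  findKeyAux value (PySem.Dict.ofList alphabeDict).items

def createMessageMatrix (message : String) (alphabeDict : List (Int × String)) : List (List (Option Int)) :=
  let numCols : Int := PySem.Int.floordiv (PySem.Str.len message + 1) 2
  -- 'message[i]' is always in range here; the none branch is an unreachable totalization guard
  let row0 := (PySem.List.pyRange 0 numCols 1).map (fun i =>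
      match PySem.Str.pyGet? message i with
      | some c => findKey (String.ofList [c]) alphabeDict
      | none => none)
  let row1 := (PySem.List.pyRange 0 numCols 1).map (fun i =>
      if numCols + i ≥ PySem.Str.len message then some 28
      else match PySem.Str.pyGet? message (numCols + i) with
        | some c => findKey (String.ofList [c]) alphabeDict
        | none => none)
  [row0, row1]

-- ===== PORT B =====
-- B's lookup: next((k for k, v in alphabeDict.items() if v == ch), None), a first-match scan
def lookupAlt (ch : Char) (alphabeDict : List (Int × String)) : Option Int :=
  ((PySem.Dict.ofList alphabeDict).items.find? (fun p => p.2 == String.ofList [ch])).map (·.1)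

-- the while loop: pop from both queues, append to both rows; 28 when the back queue is empty
def consumeHalves (alphabeDict : List (Int × String)) :
    List Char → List Char → List (Option Int) → List (Option Int) →
    List (Option Int) × List (Option Int)
  | [], _, row0, row1 => (row0, row1)
  | f :: front, back, row0, row1 =>
      let bot : Option Int := match back with
        | [] => some 28
        | b :: _ => lookupAlt b alphabeDict
      consumeHalves alphabeDict front (back.drop 1) (row0 ++ [lookupAlt f alphabeDict]) (row1 ++ [bot])

def createMessageMatrix_alt (message : String) (alphabeDict : List (Int × String)) : List (List (Option Int)) :=
  let n : Int := PySem.Int.floordiv (PySem.Str.len message + 1) 2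
  let front := (PySem.List.slice message.toList none (some n))
  let back := (PySem.List.slice message.toList (some n) none)
  let (row0, row1) := consumeHalves alphabeDict front back [] []
  [row0, row1]

-- ===== PRECONDITION & SPEC =====
def Spec_createMessageMatrix (message : String) (alphabeDict : List (Int × String)) (out : List (List (Option Int))) : Prop := out = createMessageMatrix_alt message alphabeDict
instance (message : String) (alphabeDict : List (Int × String)) (out : List (List (Option Int))) : Decidable (Spec_createMessageMatrix message alphabeDict out) := by unfold Spec_createMessageMatrix; infer_instance

-- ===== CLAIM (what is proved, stated in full; the proofs are below) =====
def Claim_equal_createMessageMatrix : Prop := ∀ (message : String) (alphabeDict : List (Int × String)), Dom_createMessageMatrix message alphabeDict → Spec_createMessageMatrix message alphabeDict (createMessageMatrix message alphabeDict)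

-- ===== LEMMAS AND PROOFS =====

-- the two first-match scans agree
theorem lookupAlt_eq_findKey (ch : Char) (alphabeDict : List (Int × String)) :
    lookupAlt ch alphabeDict = findKey (String.ofList [ch]) alphabeDict := by
  unfold lookupAlt findKey
  generalize (PySem.Dict.ofList alphabeDict).items = L
  induction L with
  | nil => simp [findKeyAux]
  | cons p rest ih =>
      obtain ⟨k, v⟩ := p
      by_cases h : v == String.ofList [ch]
      · simp [findKeyAux, List.find?, h]
      · simp [findKeyAux, List.find?, h] at *
        exact ih

-- closed form of the lockstep consumption loop
theorem consumeHalves_eq (alphabeDict : List (Int × String)) (front back : List Char)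
    (row0 row1 : List (Option Int)) :
    consumeHalves alphabeDict front back row0 row1 =
      (row0 ++ front.map (fun c => lookupAlt c alphabeDict),
       row1 ++ (List.range front.length).map (fun i =>
          match back[i]? with
          | some b => lookupAlt b alphabeDict
          | none => some 28)) := by
  induction front generalizing back row0 row1 with
  | nil => simp [consumeHalves]
  | cons f fs ih =>
      simp only [consumeHalves]
      rw [ih]
      refine Prod.ext ?_ ?_
      · simp
      · simp only [List.length_cons, List.range_succ_eq_map, List.map_cons, List.map_map,
          Function.comp_def, List.append_assoc, List.singleton_append]
        congr 2
        · cases back <;> simp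
        · cases back <;> simp

-- A's first row equals the mapped front half
theorem row0_eq (F : Char → Option Int) (cs : List Char) (N : Nat) (h : N ≤ cs.length) :
    (List.range N).map (fun i =>
        match cs[i]? with
        | some c => F c
        | none => (none : Option Int))
      = (cs.take N).map F := by
  apply List.ext_getElem
  · simp [Nat.min_eq_left h]
  · intro i h1 h2
    simp only [List.getElem_map, List.getElem_range, List.getElem_take]
    have hi : i < cs.length := by
      have : i < N := by simpa using h1
      omega
    rw [List.getElem?_eq_getElem hi]

-- A's second row (per-cell padding test) equals B's back-queue lookups
theorem row1_eq (F : Char → Option Int) (cs : List Char) (N : Nat)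
    (hN : N = (cs.length + 1) / 2) :
    (List.range N).map (fun i =>
        if cs.length ≤ N + i then some 28
        else match cs[N + i]? with
          | some c => F c
          | none => (none : Option Int))
      = (List.range N).map (fun i =>
        match (cs.drop N)[i]? with
        | some b => F b
        | none => some 28) := by
  apply List.map_congr_left
  intro i hi
  have hiN : i < N := by simpa using hi
  rw [List.getElem?_drop]
  by_cases h : N + i < cs.length
  · rw [if_neg (by omega), List.getElem?_eq_getElem h]
  · rw [if_pos (by omega), List.getElem?_eq_none (by omega)]

theorem createMessageMatrix_spec : Claim_equal_createMessageMatrix := by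
  intro message alphabeDict _
  unfold Spec_createMessageMatrix createMessageMatrix createMessageMatrix_alt
  simp only [PySem.Str.len_eq]
  rw [show ((message.toList.length : Int) + 1) = ((message.toList.length + 1 : Nat) : Int) by
        push_cast; ring]
  rw [show PySem.Int.floordiv ((message.toList.length + 1 : Nat) : Int) 2
        = (((message.toList.length + 1) / 2 : Nat) : Int) from by
        exact_mod_cast PySem.Int.floordiv_natCast (message.toList.length + 1) 2]
  rw [PySem.List.slice_to _ (by positivity), PySem.List.slice_from _ (by positivity),
      PySem.List.pyRange_zero_natCast, consumeHalves_eq]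
  have hle : (message.toList.length + 1) / 2 ≤ message.toList.length := by omega
  simp only [Int.toNat_natCast, List.map_map, Function.comp_def,
    ← Nat.cast_add, PySem.Str.pyGet?_natCast, ge_iff_le, Nat.cast_le, List.nil_append,
    List.length_take, lookupAlt_eq_findKey, Nat.min_eq_left hle]
  congr 1
  · exact row0_eq _ message.toList _ hle
  congr 1
  exact row1_eq (fun c => findKey (String.ofList [c]) alphabeDict) message.toList _ rfl
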